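-- pv_equiv track=rewrite | github.com/AireeShadow/pipe-hack | pipehack.py | image_picker
-- ===== SOURCE A (Python) =====
-- def image_picker(button_type: str, directions: list) -> str:
--     if button_type == 'half':
--         if 'north' in directions:
--             pic = 'pic/half_north.png'
--         elif 'south' in directions:
--             pic = 'pic/half_south.png'
--         elif 'west' in directions:
--             pic = 'pic/half_west.png'
--         elif 'east' in directions:
--             pic = 'pic/half_east.png'
--     elif button_type == 'corner':
--         if all(x in directions for x in ['north', 'east']):
--             pic = 'pic/corner_north_east.png'
--         elif all(x in directions for x in ['north', 'west']):
--             pic = 'pic/corner_north_west.png'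
--         elif all(x in directions for x in ['south', 'east']):
--             pic = 'pic/corner_south_east.png'
--         elif all(x in directions for x in ['south', 'west']):
--             pic = 'pic/corner_south_west.png'
--     elif button_type == 'straight':
--         if all(x in directions for x in ['south', 'north']):
--             pic = 'pic/straight_north_south.png'
--         elif all(x in directions for x in ['east', 'west']):
--             pic = 'pic/straight_west_east.png'
--     elif button_type == 'three':
--         if all(x in directions for x in ['south', 'east', 'north']):
--             pic = 'pic/three_north_south_east.png'
--         elif all(x in directions for x in ['south', 'west', 'north']):
--             pic = 'pic/three_north_south_west.png'
--         elif all(x in directions for x in ['west', 'east', 'north']):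
--             pic = 'pic/three_north_west_east.png'
--         elif all(x in directions for x in ['south', 'east', 'west']):
--             pic = 'pic/three_south_west_east.png'
--     elif button_type == 'intersection':
--         pic = 'pic/intersection.png'
--     elif button_type == 'empty':
--         pic = 'pic/empty.png'
--     return pic
-- ===== SOURCE B (Python) =====
-- RULES = {
--     'half': [(('north',), 'pic/half_north.png'),
--              (('south',), 'pic/half_south.png'),
--              (('west',), 'pic/half_west.png'),
--              (('east',), 'pic/half_east.png')],
--     'corner': [(('north', 'east'), 'pic/corner_north_east.png'),
--                (('north', 'west'), 'pic/corner_north_west.png'),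
--                (('south', 'east'), 'pic/corner_south_east.png'),
--                (('south', 'west'), 'pic/corner_south_west.png')],
--     'straight': [(('south', 'north'), 'pic/straight_north_south.png'),
--                  (('east', 'west'), 'pic/straight_west_east.png')],
--     'three': [(('south', 'east', 'north'), 'pic/three_north_south_east.png'),
--               (('south', 'west', 'north'), 'pic/three_north_south_west.png'),
--               (('west', 'east', 'north'), 'pic/three_north_west_east.png'),
--               (('south', 'east', 'west'), 'pic/three_south_west_east.png')],
--     'intersection': [((), 'pic/intersection.png')],
--     'empty': [((), 'pic/empty.png')],
-- }
--
--
-- def image_picker(button_type: str, directions: list) -> str: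
--     have = set(directions)
--     for required, name in RULES.get(button_type, []):
--         if have.issuperset(required):
--             pic = name
--             break
--     return pic
-- ===== Notes on version B (the rewrite author's own statement) =====
-- stated objective: simpler
-- what changed: Replaced the four-level nested if/elif chain by a declarative rule table (dict from button_type to an ordered list of (required-directions, filename) rules) scanned once with first-match-wins over a set of the directions.
import Mathlib
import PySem

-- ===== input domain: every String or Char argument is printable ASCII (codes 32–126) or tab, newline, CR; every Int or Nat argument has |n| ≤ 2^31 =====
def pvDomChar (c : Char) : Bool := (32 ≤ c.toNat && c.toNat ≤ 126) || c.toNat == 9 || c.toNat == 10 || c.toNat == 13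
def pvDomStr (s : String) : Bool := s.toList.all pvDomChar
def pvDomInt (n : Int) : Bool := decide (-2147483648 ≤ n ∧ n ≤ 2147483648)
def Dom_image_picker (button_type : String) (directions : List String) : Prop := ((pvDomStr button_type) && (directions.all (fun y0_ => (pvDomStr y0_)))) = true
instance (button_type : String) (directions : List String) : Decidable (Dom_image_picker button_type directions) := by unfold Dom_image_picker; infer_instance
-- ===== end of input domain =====

-- B replaces A's nested if/elif chain by an ordered rule table scanned with first-match-wins (objective: simpler).
-- On inputs where no branch assigns `pic`, both Pythons raise UnboundLocalError; Pre_ excludes exactly those inputs.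

-- ===== PORT A =====
-- literal transliteration of A's if/elif chain; the final "" stands for the unassigned
-- `pic` (UnboundLocalError in Python), reachable only outside Pre_image_picker
def image_picker (button_type : String) (directions : List String) : String :=
  if button_type == "half" then
    if directions.contains "north" then "pic/half_north.png"
    else if directions.contains "south" then "pic/half_south.png"
    else if directions.contains "west" then "pic/half_west.png"
    else if directions.contains "east" then "pic/half_east.png"
    else ""
  else if button_type == "corner" then
    if ["north", "east"].all (fun x => directions.contains x) then "pic/corner_north_east.png"
    else if ["north", "west"].all (fun x => directions.contains x) then "pic/corner_north_west.png"
    else if ["south", "east"].all (fun x => directions.contains x) then "pic/corner_south_east.png"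
    else if ["south", "west"].all (fun x => directions.contains x) then "pic/corner_south_west.png"
    else ""
  else if button_type == "straight" then
    if ["south", "north"].all (fun x => directions.contains x) then "pic/straight_north_south.png"
    else if ["east", "west"].all (fun x => directions.contains x) then "pic/straight_west_east.png"
    else ""
  else if button_type == "three" then
    if ["south", "east", "north"].all (fun x => directions.contains x) then "pic/three_north_south_east.png"
    else if ["south", "west", "north"].all (fun x => directions.contains x) then "pic/three_north_south_west.png"
    else if ["west", "east", "north"].all (fun x => directions.contains x) then "pic/three_north_west_east.png"
    else if ["south", "east", "west"].all (fun x => directions.contains x) then "pic/three_south_west_east.png"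
    else ""
  else if button_type == "intersection" then "pic/intersection.png"
  else if button_type == "empty" then "pic/empty.png"
  else ""

-- ===== PORT B =====
-- Source B's module-level dict RULES, as an association list (distinct literal keys, insertion order)
def pipeRules : List (String × List (List String × String)) :=
  [("half", [(["north"], "pic/half_north.png"),
             (["south"], "pic/half_south.png"),
             (["west"], "pic/half_west.png"),
             (["east"], "pic/half_east.png")]),
   ("corner", [(["north", "east"], "pic/corner_north_east.png"),
               (["north", "west"], "pic/corner_north_west.png"),
               (["south", "east"], "pic/corner_south_east.png"),
               (["south", "west"], "pic/corner_south_west.png")]),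
   ("straight", [(["south", "north"], "pic/straight_north_south.png"),
                 (["east", "west"], "pic/straight_west_east.png")]),
   ("three", [(["south", "east", "north"], "pic/three_north_south_east.png"),
              (["south", "west", "north"], "pic/three_north_south_west.png"),
              (["west", "east", "north"], "pic/three_north_west_east.png"),
              (["south", "east", "west"], "pic/three_south_west_east.png")]),
   ("intersection", [([], "pic/intersection.png")]),
   ("empty", [([], "pic/empty.png")])]

-- transliteration of Source B: RULES.get(button_type, []) is List.lookup on the distinct-key
-- association list (exact: first match = only match); set(directions) is built once; the
-- first rule whose requirements are a subset of the set wins; the none-branch "" stands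
-- for the unassigned `pic` (UnboundLocalError), reachable only outside Pre_image_picker
def image_picker_alt (button_type : String) (directions : List String) : String :=
  let have_ : PySem.Set String := PySem.Set.ofList directions
  match ((List.lookup button_type pipeRules).getD []).find?
      (fun rule => PySem.Set.issuperset have_ rule.1) with
  | some rule => rule.2
  | none => ""

-- ===== PRECONDITION & SPEC =====
-- Pre_ excludes exactly the inputs on which Python A raises UnboundLocalError (`pic` never
-- assigned): an unknown button_type, or a known one none of whose direction requirements is met.
def Pre_image_picker (button_type : String) (directions : List String) : Prop :=
  ((button_type == "half" && (directions.contains "north" || directions.contains "south" ||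
      directions.contains "west" || directions.contains "east")) ||
   (button_type == "corner" && ((directions.contains "north" && directions.contains "east") ||
      (directions.contains "north" && directions.contains "west") ||
      (directions.contains "south" && directions.contains "east") ||
      (directions.contains "south" && directions.contains "west"))) ||
   (button_type == "straight" && ((directions.contains "south" && directions.contains "north") ||
      (directions.contains "east" && directions.contains "west"))) ||
   (button_type == "three" && ((directions.contains "south" && directions.contains "east" && directions.contains "north") ||
      (directions.contains "south" && directions.contains "west" && directions.contains "north") ||
      (directions.contains "west" && directions.contains "east" && directions.contains "north") ||
      (directions.contains "south" && directions.contains "east" && directions.contains "west"))) ||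
   (button_type == "intersection") || (button_type == "empty")) = true
instance (button_type : String) (directions : List String) : Decidable (Pre_image_picker button_type directions) := by unfold Pre_image_picker; infer_instance

def pvWitness_image_picker : String × List String := ("corner", ["east", "north"])

def Spec_image_picker (button_type : String) (directions : List String) (out : String) : Prop := out = image_picker_alt button_type directions
instance (button_type : String) (directions : List String) (out : String) : Decidable (Spec_image_picker button_type directions out) := by unfold Spec_image_picker; infer_instance

-- ===== CLAIM (what is proved, stated in full; the proofs are below) =====
def Claim_equal_image_picker : Prop := ∀ (button_type : String) (directions : List String), Dom_image_picker button_type directions → Pre_image_picker button_type directions → Spec_image_picker button_type directions (image_picker button_type directions)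

-- ===== LEMMAS AND PROOFS =====

theorem issuperset_ofList (ds l : List String) :
    PySem.Set.issuperset (PySem.Set.ofList ds) l = l.all (fun x => ds.contains x) := by
  simp [PySem.Set.issuperset, PySem.Set.issubset, PySem.Set.contains,
    PySem.Set.mem_ofList, List.contains_eq_mem]

-- ===== VERDICT (by name: the statement is the Claim_ definition above) =====
theorem image_picker_spec : Claim_equal_image_picker := by
  intro bt ds _ hpre
  unfold Spec_image_picker
  by_cases h1 : bt = "half"
  · subst h1
    by_cases hn : ds.contains "north" = true <;> by_cases hs : ds.contains "south" = true <;>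
      by_cases hw : ds.contains "west" = true <;> by_cases he : ds.contains "east" = true <;>
      simp_all [image_picker, image_picker_alt, pipeRules, issuperset_ofList, List.find?]
  by_cases h2 : bt = "corner"
  · subst h2
    by_cases hn : ds.contains "north" = true <;> by_cases hs : ds.contains "south" = true <;>
      by_cases hw : ds.contains "west" = true <;> by_cases he : ds.contains "east" = true <;>
      simp_all [image_picker, image_picker_alt, pipeRules, issuperset_ofList, List.lookup, List.find?]
  by_cases h3 : bt = "straight"
  · subst h3
    by_cases hn : ds.contains "north" = true <;> by_cases hs : ds.contains "south" = true <;>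
      by_cases hw : ds.contains "west" = true <;> by_cases he : ds.contains "east" = true <;>
      simp_all [image_picker, image_picker_alt, pipeRules, issuperset_ofList, List.lookup, List.find?]
  by_cases h4 : bt = "three"
  · subst h4
    by_cases hn : ds.contains "north" = true <;> by_cases hs : ds.contains "south" = true <;>
      by_cases hw : ds.contains "west" = true <;> by_cases he : ds.contains "east" = true <;>
      simp_all [image_picker, image_picker_alt, pipeRules, issuperset_ofList, List.lookup, List.find?]
  by_cases h5 : bt = "intersection"
  · subst h5
    simp [image_picker, image_picker_alt, pipeRules, issuperset_ofList, List.lookup]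
  by_cases h6 : bt = "empty"
  · subst h6
    simp [image_picker, image_picker_alt, pipeRules, issuperset_ofList, List.lookup]
  exact absurd hpre (by simp [Pre_image_picker, beq_iff_eq, h1, h2, h3, h4, h5, h6])
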